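-- pv_equiv track=rewrite | github.com/pc1493/Japanese-Music-Analysis | scripts/extract_japanese_music.py | has_japanese_genre
-- ===== SOURCE A (Python) =====
-- def has_japanese_genre(genres):
--     """Check if artist has Japanese-related genres"""
--     japanese_genres = [
--         'j-pop', 'j-rock', 'j-rap', 'j-indie', 'j-dance',
--         'city pop', 'shibuya-kei', 'anime', 'japanese r&b',
--         'japanese rock', 'japanese hip hop', 'jpop', 'jrock',
--         'visual kei', 'enka', 'kayokyoku'
--     ]
--     if not genres:
--         return False
--     return any(jgenre in genre.lower() for jgenre in japanese_genres for genre in genres)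
-- ===== SOURCE B (Python) =====
-- import re
--
-- _JAPANESE_RE = re.compile('|'.join(
--     re.escape(k) for k in [
--         'j-pop', 'j-rock', 'j-rap', 'j-indie', 'j-dance',
--         'city pop', 'shibuya-kei', 'anime', 'japanese r&b',
--         'japanese rock', 'japanese hip hop', 'jpop', 'jrock',
--         'visual kei', 'enka', 'kayokyoku'
--     ]))
--
--
-- def has_japanese_genre(genres):
--     """Check if artist has Japanese-related genres"""
--     if not genres:
--         return False
--     return any(_JAPANESE_RE.search(genre.lower()) is not None for genre in genres)
-- ===== Notes on version B (the rewrite author's own statement) =====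
-- stated objective: faster
-- what changed: Replaced the per-keyword loop (which re-lowers each genre and runs a fresh substring scan for every one of the 16 keywords) with one module-level compiled regex alternating the escaped keywords, lowering each genre once and testing it with a single pattern.search.
import Mathlib
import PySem

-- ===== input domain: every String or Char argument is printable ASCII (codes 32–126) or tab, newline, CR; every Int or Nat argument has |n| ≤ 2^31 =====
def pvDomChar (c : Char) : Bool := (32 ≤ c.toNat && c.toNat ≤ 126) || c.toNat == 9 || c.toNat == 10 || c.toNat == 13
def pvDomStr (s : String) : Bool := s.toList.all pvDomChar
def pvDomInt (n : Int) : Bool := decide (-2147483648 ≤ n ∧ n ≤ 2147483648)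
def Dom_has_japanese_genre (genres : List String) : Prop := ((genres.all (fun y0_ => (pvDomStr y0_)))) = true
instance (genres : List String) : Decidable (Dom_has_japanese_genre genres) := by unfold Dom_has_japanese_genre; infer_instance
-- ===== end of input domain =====

-- B replaces A's per-keyword substring loop (which re-lowers each genre for every keyword)
-- by one compiled regex alternating the escaped keywords, tested once per lowered genre
-- (measured faster; constant factor). Return-value equivalence only; neither version mutates.

-- ===== PORT A =====
-- A's local keyword list
def pvKwsA : List String :=
  ["j-pop", "j-rock", "j-rap", "j-indie", "j-dance",
   "city pop", "shibuya-kei", "anime", "japanese r&b",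
   "japanese rock", "japanese hip hop", "jpop", "jrock",
   "visual kei", "enka", "kayokyoku"]

-- any(jgenre in genre.lower() for jgenre in japanese_genres for genre in genres):
-- outer generator over keywords, inner over genres, 'in' = PySem.Str.isIn
def has_japanese_genre (genres : List String) : Bool :=
  if genres.isEmpty then false
  else pvKwsA.any (fun jgenre => genres.any (fun genre => PySem.Str.isIn jgenre (PySem.Str.lower genre)))

-- ===== PORT B =====
-- B's keyword list (the literals fed to re.escape; all are regex-literal after escaping)
def pvKwsB : List (List Char) :=
  ["j-pop".toList, "j-rock".toList, "j-rap".toList, "j-indie".toList, "j-dance".toList,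
   "city pop".toList, "shibuya-kei".toList, "anime".toList, "japanese r&b".toList,
   "japanese rock".toList, "japanese hip hop".toList, "jpop".toList, "jrock".toList,
   "visual kei".toList, "enka".toList, "kayokyoku".toList]

-- _JAPANESE_RE.search(g): the regex engine's left-to-right scan of the alternation of
-- escaped literal keywords — at each start position try each alternative as a prefix.
-- Exact port of re.search for an alternation of literals (start positions 0..len g).
def pvReSearchAlt (g : List Char) : Bool :=
  (List.range (g.length + 1)).any (fun i => pvKwsB.any (fun k => PySem.Chars.startswith (g.drop i) k))

def has_japanese_genre_alt (genres : List String) : Bool :=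
  if genres.isEmpty then false
  else genres.any (fun genre => pvReSearchAlt (PySem.Chars.lower genre.toList))

-- ===== PRECONDITION & SPEC =====
def Spec_has_japanese_genre (genres : List String) (out : Bool) : Prop := out = has_japanese_genre_alt genres
instance (genres : List String) (out : Bool) : Decidable (Spec_has_japanese_genre genres out) := by unfold Spec_has_japanese_genre; infer_instance

-- ===== CLAIM (what is proved, stated in full; the proofs are below) =====
def Claim_equal_has_japanese_genre : Prop := ∀ (genres : List String), Dom_has_japanese_genre genres → Spec_has_japanese_genre genres (has_japanese_genre genres)

-- ===== LEMMAS AND PROOFS =====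

-- the regex scan finds a keyword iff some keyword is a substring ('in') of g
theorem pvReSearchAlt_eq_any_isIn (g : List Char) :
    pvReSearchAlt g = pvKwsB.any (fun k => PySem.Chars.isIn k g) := by
  unfold pvReSearchAlt
  rw [Bool.eq_iff_iff]
  simp only [List.any_eq_true, List.mem_range, PySem.Chars.startswith_iff]
  constructor
  · rintro ⟨i, _, k, hk, hpre⟩
    exact ⟨k, hk, (PySem.Chars.exists_prefix_drop_iff_isIn k g).mp ⟨i, hpre⟩⟩
  · rintro ⟨k, hk, hin⟩
    obtain ⟨j, hpre⟩ := (PySem.Chars.exists_prefix_drop_iff_isIn k g).mpr hin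
    by_cases hj : j ≤ g.length
    · exact ⟨j, by omega, k, hk, hpre⟩
    · refine ⟨g.length, by omega, k, hk, ?_⟩
      rw [List.drop_length]
      rwa [List.drop_eq_nil_of_le (by omega)] at hpre

-- swapping the two generators of a boolean 'any' of 'any'
theorem pvAnySwap {α β : Type} (l : List α) (m : List β) (f : α → β → Bool) :
    l.any (fun a => m.any (fun b => f a b)) = m.any (fun b => l.any (fun a => f a b)) := by
  rw [Bool.eq_iff_iff]
  simp only [List.any_eq_true]
  tauto

theorem pvKwsB_eq_map : pvKwsB = pvKwsA.map String.toList := by rfl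

-- ===== VERDICT (by name: the statement is the Claim_ definition above) =====
theorem has_japanese_genre_spec : Claim_equal_has_japanese_genre := by
  intro genres _
  unfold Spec_has_japanese_genre has_japanese_genre has_japanese_genre_alt
  by_cases h : genres.isEmpty
  · simp [h]
  · simp only [h, Bool.false_eq_true, if_false]
    rw [pvAnySwap pvKwsA genres]
    simp only [pvReSearchAlt_eq_any_isIn, pvKwsB_eq_map, List.any_map, Function.comp_def,
      PySem.Str.isIn_eq, PySem.Str.toList_lower]
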